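-- pv_equiv track=rewrite | github.com/AsokTamang/Leetcode-DSA | basics/strings1.py | optsubstring
-- ===== SOURCE A (Python) =====
-- from collections import defaultdict
--
-- def optsubstring(s):
--     n = len(s)
--     count = 0
--     left = 0
--     m = defaultdict(
--         int
--     )  # here we are using the default dict instead of the usual dict inorder to make our code shorter and faster
--     for i in range(n):
--         m[
--             s[i]
--         ] += 1  # here what we are doing is storing the charcaters of s at every index i in the storage m
--         while (
--             len(m) == 3
--         ):  # if the length of the storage is m , which means we have found a substring consisting of all the characters at the current index i,then we increase the count by n-i
--             count += n - i
--             m[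
--                 s[left]
--             ] -= 1  # then inorder to remove the left most part of the charc of a string which is store in  our storage m , we are doing this calculation
--             if m[s[left]] == 0:
--                 m.pop(s[left])
--             left += 1
--     return count
-- ===== SOURCE B (Python) =====
-- def optsubstring(s):
--     # For each right endpoint i, a start l is valid iff at least three distinct
--     # characters have their last occurrence >= l, i.e. l <= third-largest last
--     # occurrence; sum (third-largest + 1) over all right endpoints.
--     ans = 0
--     last = {}
--     for i, c in enumerate(s):
--         last[c] = i
--         if len(last) >= 3:
--             ans += sorted(last.values(), reverse=True)[2] + 1
--     return ans
-- ===== Notes on version B (the rewrite author's own statement) =====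
-- stated objective: alternative
-- what changed: B replaces A's shrinking frequency-count window (decrement/pop while 3 distinct, adding n-i per shift) by a last-occurrence table: for each right endpoint it adds third-largest-last-occurrence + 1, with no left pointer, no frequency counts and no while loop.
import Mathlib
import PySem

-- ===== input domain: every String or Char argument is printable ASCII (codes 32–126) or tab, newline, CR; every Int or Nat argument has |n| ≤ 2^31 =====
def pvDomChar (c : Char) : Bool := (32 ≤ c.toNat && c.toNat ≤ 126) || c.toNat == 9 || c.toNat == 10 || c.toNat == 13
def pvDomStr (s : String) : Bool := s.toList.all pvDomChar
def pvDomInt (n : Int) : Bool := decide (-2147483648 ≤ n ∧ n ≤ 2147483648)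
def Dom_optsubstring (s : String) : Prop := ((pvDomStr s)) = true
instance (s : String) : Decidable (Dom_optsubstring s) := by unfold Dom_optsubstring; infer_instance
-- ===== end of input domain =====

-- B replaces A's shrinking frequency-count window by a last-occurrence table: for each right
-- endpoint it adds (third-largest last occurrence + 1) valid start positions (alternative algorithm).

-- ===== PORT A =====
-- the `while len(m) == 3:` loop of A; fuel makes the recursion total (each Python iteration
-- advances `left`, so `len(s)` steps always suffice on reachable states)
def pvShrinkA (cs : List Char) (n i : Int) : Nat → Int × Int × PySem.Dict Char Int → Int × Int × PySem.Dict Char Int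
  | 0, st => st
  | fuel + 1, (count, left, m) =>
    if m.size = 3 then
      let count := count + (n - i)
      let c := PySem.List.pyGetD cs left ' '
      let m := m.modify c 0 (· - 1)
      -- `m.pop(s[left])`: the popped value is discarded, so this is erase
      let m := if m.getD c 0 = 0 then m.erase c else m
      pvShrinkA cs n i fuel (count, left + 1, m)
    else (count, left, m)

def pvStepA (cs : List Char) (n : Int) (st : Int × Int × PySem.Dict Char Int) (i : Int) : Int × Int × PySem.Dict Char Int :=
  let m := st.2.2.modify (PySem.List.pyGetD cs i ' ') 0 (· + 1)
  pvShrinkA cs n i cs.length (st.1, st.2.1, m)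

def optsubstring (s : String) : Int :=
  let cs := s.toList
  let n : Int := PySem.Str.len s
  ((PySem.List.pyRange 0 n 1).foldl (pvStepA cs n) (0, 0, PySem.Dict.empty)).1

-- ===== PORT B =====
-- one step of B's `for i, c in enumerate(s)` loop: record the last occurrence of c, then, if at
-- least three distinct characters have been seen, add (third-largest last occurrence + 1)
def pvStepB (st : Int × PySem.Dict Char Int) (p : Int × Char) : Int × PySem.Dict Char Int :=
  let last := st.2.insert p.2 p.1
  (if 3 ≤ last.size then
     st.1 + (PySem.List.pyGetD (PySem.List.sorted last.values (fun v => v) true) 2 0 + 1)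
   else st.1, last)

def optsubstring_alt (s : String) : Int :=
  ((PySem.List.enumerate s.toList).foldl pvStepB (0, PySem.Dict.empty)).1

-- ===== PRECONDITION & SPEC =====
def Spec_optsubstring (s : String) (out : Int) : Prop := out = optsubstring_alt s
instance (s : String) (out : Int) : Decidable (Spec_optsubstring s out) := by unfold Spec_optsubstring; infer_instance

-- ===== CLAIM (what is proved, stated in full; the proofs are below) =====
def Claim_equal_optsubstring : Prop := ∀ (s : String), Dom_optsubstring s → Spec_optsubstring s (optsubstring s)

-- ===== LEMMAS AND PROOFS =====

-- number of distinct characters of a list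
def pvDC (xs : List Char) : Nat := xs.toFinset.card

-- index of the last occurrence of ch in cs, -1 if absent (Python's running `last[c] = i` table)
def pvLast : List Char → Char → Int
  | [], _ => -1
  | c :: cs, ch => if 0 ≤ pvLast cs ch then pvLast cs ch + 1 else if c = ch then 0 else -1

-- A's window invariant: m is the zero-free frequency table of pre[left:], every start < left
-- already sees ≥ 3 distinct characters, the window itself sees ≤ 2
def pvInvA (pre : List Char) (l : Nat) (m : PySem.Dict Char Int) : Prop :=
  l ≤ pre.length ∧ m.keys.Nodup ∧
  (∀ ch, m.getD ch 0 = ((pre.drop l).count ch : Int)) ∧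
  (∀ ch ∈ m.keys, m.getD ch 0 ≠ 0) ∧
  (∀ j : Nat, j < l → 3 ≤ pvDC (pre.drop j)) ∧
  pvDC (pre.drop l) ≤ 2

-- B's invariant: d maps exactly the characters of pre to their last occurrence index
def pvInvB (pre : List Char) (d : PySem.Dict Char Int) : Prop :=
  d.keys.Nodup ∧ ∀ ch, d.get? ch = if ch ∈ pre then some (pvLast pre ch) else none

lemma pvLast_mem (ch : Char) : ∀ (cs : List Char), ch ∈ cs ↔ 0 ≤ pvLast cs ch := by
  intro cs
  induction cs with
  | nil => simp [pvLast]
  | cons c cs ih =>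
    simp only [pvLast, List.mem_cons]
    split_ifs with h1 h2
    · constructor
      · intro _; omega
      · intro _; exact Or.inr (ih.mpr h1)
    · subst h2
      simp
    · constructor
      · rintro (rfl | h)
        · exact absurd rfl h2
        · exact absurd (ih.mp h) h1
      · intro h; omega

lemma pvLast_drop (ch : Char) : ∀ (l : Nat) (cs : List Char), ch ∈ cs.drop l ↔ (l : Int) ≤ pvLast cs ch := by
  intro l
  induction l with
  | zero => intro cs; simpa using pvLast_mem ch cs
  | succ l ih =>
    intro cs
    cases cs with
    | nil => simp [pvLast]
    | cons c cs =>
      rw [List.drop_succ_cons, ih cs]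
      simp only [pvLast]
      split_ifs with h1 h2 <;> push_cast <;> omega

lemma pvLast_append (pre : List Char) (c ch : Char) :
    pvLast (pre ++ [c]) ch = if ch = c then (pre.length : Int) else pvLast pre ch := by
  induction pre with
  | nil =>
    rcases eq_or_ne ch c with h | h
    · subst h; simp [pvLast]
    · simp [pvLast, h, Ne.symm h]
  | cons a pre ih =>
    simp only [List.cons_append, pvLast, ih, List.length_cons]
    split_ifs <;> push_cast <;> omega

lemma pvLen_eq_DC (ys xs : List Char) (hnd : ys.Nodup) (h : ∀ a, a ∈ ys ↔ a ∈ xs) :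
    ys.length = pvDC xs := by
  have h1 : ys.toFinset = xs.toFinset := by ext a; simpa using h a
  rw [pvDC, ← h1, List.toFinset_card_of_nodup hnd]

lemma pvDC_append_ge (xs : List Char) (c : Char) : pvDC xs ≤ pvDC (xs ++ [c]) := by
  apply Finset.card_le_card
  intro a ha
  simp only [List.toFinset_append, Finset.mem_union]
  exact Or.inl ha

lemma pvSize_eq_keys_length (m : PySem.Dict Char Int) : m.size = m.keys.length := by
  simp [PySem.Dict.size, PySem.Dict.keys]

lemma pvSize_eq_values_length (m : PySem.Dict Char Int) : m.size = m.values.length := by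
  simp [PySem.Dict.size, PySem.Dict.values]

lemma pvKeys_length_eq_DC (xs : List Char) (m : PySem.Dict Char Int)
    (hnd : m.keys.Nodup) (hcnt : ∀ ch, m.getD ch 0 = (xs.count ch : Int))
    (hnz : ∀ ch ∈ m.keys, m.getD ch 0 ≠ 0) : m.keys.length = pvDC xs := by
  apply pvLen_eq_DC _ _ hnd
  intro a
  constructor
  · intro ha
    have h1 := hnz a ha
    rw [hcnt] at h1
    have h2 : 0 < xs.count a := by omega
    exact List.count_pos_iff.mp h2
  · intro ha
    have hc : 0 < xs.count a := List.count_pos_iff.mpr ha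
    have h1 : m.getD a 0 ≠ 0 := by rw [hcnt]; omega
    by_contra hk
    have hcont : m.contains a = false := by
      cases hb : m.contains a
      · rfl
      · exact absurd ((PySem.Dict.contains_iff_mem_keys m a).mp hb) hk
    exact h1 (PySem.Dict.getD_of_not_contains m 0 hcont)

lemma pvKeys_nil_of_window_nil (pre : List Char) (l : Nat) (m : PySem.Dict Char Int)
    (hcnt : ∀ ch, m.getD ch 0 = ((pre.drop l).count ch : Int))
    (hnz : ∀ ch ∈ m.keys, m.getD ch 0 ≠ 0) (hwin : pre.drop l = []) : m.keys = [] := by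
  refine List.eq_nil_iff_forall_not_mem.mpr (fun ch hch => ?_)
  have := hnz ch hch
  rw [hcnt ch, hwin] at this
  simp at this

lemma pvFind_filter_ne (k ch : Char) (h : ch ≠ k) : ∀ (l : List (Char × Int)),
    List.find? (fun p => p.1 == ch) (l.filter (fun p => !(p.1 == k))) = List.find? (fun p => p.1 == ch) l := by
  intro l
  induction l with
  | nil => rfl
  | cons p l ih =>
    by_cases hpk : p.1 = k
    · have hk : (k == ch) = false := by simp; exact fun e => h e.symm
      simp [hpk, List.find?, hk, ih]
    · by_cases hpch : p.1 = ch
      · have hck : ¬ (ch = k) := h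
        simp [List.find?, hpch, hck]
      · have hf : (p.1 == ch) = false := by simp [hpch]
        simp [hpk, List.find?, hf, ih]

lemma pvGetD_erase_of_ne (m : PySem.Dict Char Int) (k ch : Char) (h : ch ≠ k) :
    (m.erase k).getD ch 0 = m.getD ch 0 := by
  simp [PySem.Dict.erase, PySem.Dict.getD, PySem.Dict.get?, pvFind_filter_ne k ch h]

lemma pvGetD_erase_self (m : PySem.Dict Char Int) (k : Char) : (m.erase k).getD k 0 = 0 := by
  have : List.find? (fun p => p.1 == k) (m.items.filter (fun p => !(p.1 == k))) = none := by
    rw [List.find?_eq_none]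
    intro x hx
    have := (List.mem_filter.mp hx).2
    simpa using this
  simp [PySem.Dict.erase, PySem.Dict.getD, PySem.Dict.get?, this]

lemma pvKeys_erase (m : PySem.Dict Char Int) (k : Char) :
    (m.erase k).keys = m.keys.filter (fun x => !(x == k)) := by
  simp [PySem.Dict.erase, PySem.Dict.keys, List.filter_map]
  rfl

lemma pvContains_of_getD_ne (m : PySem.Dict Char Int) (ch : Char) (h : m.getD ch 0 ≠ 0) :
    m.contains ch = true := by
  by_contra hc
  exact h (PySem.Dict.getD_of_not_contains m 0 (by simpa using hc))

-- run of A's while-loop: it advances left to the least start whose window has ≤ 2 distinct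
-- characters, adding (n-i) per shift, and keeps the frequency-table invariant
lemma pvShrink_spec (cs : List Char) (n i : Int) :
    ∀ (fuel : Nat) (pre : List Char) (leftN : Nat) (m : PySem.Dict Char Int) (cnt : Int),
    pre <+: cs → leftN ≤ pre.length → m.keys.Nodup →
    (∀ ch, m.getD ch 0 = ((pre.drop leftN).count ch : Int)) →
    (∀ ch ∈ m.keys, m.getD ch 0 ≠ 0) →
    (∀ j : Nat, j < leftN → 3 ≤ pvDC (pre.drop j)) →
    pre.length - leftN ≤ fuel → m.size ≤ 3 →
    ∃ (l' : Nat) (m' : PySem.Dict Char Int),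
      pvShrinkA cs n i fuel (cnt, (leftN : Int), m) = (cnt + (n - i) * ((l' : Int) - (leftN : Int)), (l' : Int), m') ∧
      leftN ≤ l' ∧ pvInvA pre l' m' := by
  intro fuel
  induction fuel with
  | zero =>
    intro pre leftN m cnt hpre hle hnd hcnt hnz hmin hfuel _hsz
    have hl : pre.length ≤ leftN := by omega
    have hwin : pre.drop leftN = [] := List.drop_eq_nil_of_le hl
    refine ⟨leftN, m, ?_, le_refl _, hle, hnd, hcnt, hnz, hmin, by rw [hwin]; simp [pvDC]⟩
    show (cnt, (leftN : Int), m) = _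
    rw [show cnt + (n - i) * ((leftN : Int) - (leftN : Int)) = cnt by ring]
  | succ fuel ih =>
    intro pre leftN m cnt hpre hle hnd hcnt hnz hmin hfuel hsz
    have hDCw : m.keys.length = pvDC (pre.drop leftN) := pvKeys_length_eq_DC _ m hnd hcnt hnz
    by_cases h3 : m.size = 3
    · -- the loop body runs
      have hlt : leftN < pre.length := by
        rcases Nat.lt_or_ge leftN pre.length with h | h
        · exact h
        · exfalso
          have hwin : pre.drop leftN = [] := List.drop_eq_nil_of_le h
          have hk := pvKeys_nil_of_window_nil pre leftN m hcnt hnz hwin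
          rw [pvSize_eq_keys_length, hk] at h3
          simp at h3
      obtain ⟨tl, htl⟩ := hpre
      have hget : PySem.List.pyGetD cs (leftN : Int) ' ' = pre[leftN]'hlt := by
        rw [PySem.List.pyGetD_natCast, ← htl, List.getD_append _ _ _ _ hlt, List.getD_eq_getElem _ _ hlt]
      have hwin : pre.drop leftN = pre[leftN]'hlt :: pre.drop (leftN + 1) := List.drop_eq_getElem_cons hlt
      set c : Char := pre[leftN]'hlt with hcdef
      have hcpos : m.getD c 0 = ((pre.drop (leftN + 1)).count c : Int) + 1 := by
        rw [hcnt, hwin]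
        simp
      have h3DC : 3 ≤ pvDC (pre.drop leftN) := by
        rw [pvSize_eq_keys_length, hDCw] at h3
        omega
      have hmin' : ∀ j : Nat, j < leftN + 1 → 3 ≤ pvDC (pre.drop j) := by
        intro j hj
        rcases Nat.lt_succ_iff_lt_or_eq.mp hj with h | h
        · exact hmin j h
        · exact h ▸ h3DC
      set m2 : PySem.Dict Char Int := m.modify c 0 (· - 1) with hm2def
      have hcnt2 : ∀ ch, m2.getD ch 0 = ((pre.drop (leftN + 1)).count ch : Int) := by
        intro ch
        rw [hm2def, PySem.Dict.getD_modify]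
        by_cases hch : ch = c
        · rw [if_pos hch, hch, hcpos]; ring
        · rw [if_neg hch, hcnt, hwin]
          have : (c == ch) = false := by simp; exact fun e => hch e.symm
          simp [List.count_cons, this]
      have hcont : m.contains c = true :=
        pvContains_of_getD_ne m c (by rw [hcpos]; omega)
      have hkeys2 : m2.keys = m.keys := by
        rw [show m2 = m.insert c (m.getD c 0 - 1) from rfl]
        exact PySem.Dict.keys_insert_of_contains m _ hcont
      have hnd2 : m2.keys.Nodup := hkeys2 ▸ hnd
      have hnz2 : ∀ ch ∈ m2.keys, ch ≠ c → m2.getD ch 0 ≠ 0 := by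
        intro ch hch hne
        rw [hm2def, PySem.Dict.getD_modify, if_neg hne]
        exact hnz ch (hkeys2 ▸ hch)
      by_cases hz : m2.getD c 0 = 0
      · -- the count hit zero: the key is popped
        have hzc : (pre.drop (leftN + 1)).count c = 0 := by
          have := hcnt2 c
          rw [hz] at this
          omega
        have hcnt3 : ∀ ch, (m2.erase c).getD ch 0 = ((pre.drop (leftN + 1)).count ch : Int) := by
          intro ch
          by_cases hch : ch = c
          · rw [hch, pvGetD_erase_self, hzc]; simp
          · rw [pvGetD_erase_of_ne _ _ _ hch, hcnt2]
        have hnd3 : (m2.erase c).keys.Nodup := by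
          rw [pvKeys_erase]; exact hnd2.filter _
        have hnz3 : ∀ ch ∈ (m2.erase c).keys, (m2.erase c).getD ch 0 ≠ 0 := by
          intro ch hch
          rw [pvKeys_erase, List.mem_filter] at hch
          have hne : ch ≠ c := by simpa using hch.2
          rw [pvGetD_erase_of_ne _ _ _ hne]
          exact hnz2 ch hch.1 hne
        have hsz3 : (m2.erase c).size ≤ 3 := by
          have h1 : (m2.erase c).size ≤ m2.size := List.length_filter_le _ _
          have h2 : m2.size = m.size := by
            rw [pvSize_eq_keys_length, pvSize_eq_keys_length, hkeys2]
          omega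
        obtain ⟨l', m', hA, hll, hinv'⟩ :=
          ih pre (leftN + 1) (m2.erase c) (cnt + (n - i)) ⟨tl, htl⟩
            (by omega) hnd3 hcnt3 hnz3 hmin' (by omega) hsz3
        refine ⟨l', m', ?_, by omega, hinv'⟩
        simp only [pvShrinkA]
        rw [if_pos h3, hget, ← hm2def, if_pos hz]
        rw [show ((leftN : Int) + 1) = ((leftN + 1 : Nat) : Int) by push_cast; ring, hA]
        rw [show cnt + (n - i) + (n - i) * ((l' : Int) - ((leftN + 1 : Nat) : Int))
            = cnt + (n - i) * ((l' : Int) - (leftN : Int)) by push_cast; ring]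
      · -- the key stays
        have hnz3 : ∀ ch ∈ m2.keys, m2.getD ch 0 ≠ 0 := by
          intro ch hch
          by_cases hne : ch = c
          · rw [hne]; exact hz
          · exact hnz2 ch hch hne
        have hsz2 : m2.size ≤ 3 := by
          rw [pvSize_eq_keys_length, hkeys2, ← pvSize_eq_keys_length]
          omega
        obtain ⟨l', m', hA, hll, hinv'⟩ :=
          ih pre (leftN + 1) m2 (cnt + (n - i)) ⟨tl, htl⟩
            (by omega) hnd2 hcnt2 hnz3 hmin' (by omega) hsz2
        refine ⟨l', m', ?_, by omega, hinv'⟩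
        simp only [pvShrinkA]
        rw [if_pos h3, hget, ← hm2def, if_neg hz]
        rw [show ((leftN : Int) + 1) = ((leftN + 1 : Nat) : Int) by push_cast; ring, hA]
        rw [show cnt + (n - i) + (n - i) * ((l' : Int) - ((leftN + 1 : Nat) : Int))
            = cnt + (n - i) * ((l' : Int) - (leftN : Int)) by push_cast; ring]
    · -- the loop exits
      have hDCle : pvDC (pre.drop leftN) ≤ 2 := by
        rw [pvSize_eq_keys_length, hDCw] at h3 hsz
        omega
      refine ⟨leftN, m, ?_, le_refl _, hle, hnd, hcnt, hnz, hmin, hDCle⟩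
      simp only [pvShrinkA]
      rw [if_neg h3]
      rw [show cnt + (n - i) * ((leftN : Int) - (leftN : Int)) = cnt by ring]

lemma pvMemKeys (pre : List Char) (d : PySem.Dict Char Int) (h : pvInvB pre d) :
    ∀ k, k ∈ d.keys ↔ k ∈ pre := by
  obtain ⟨hnd, hget⟩ := h
  intro k
  rw [← PySem.Dict.contains_iff_mem_keys, PySem.Dict.contains_eq_isSome_get?, hget k]
  by_cases hk : k ∈ pre <;> simp [hk]

lemma pvValues_nonneg (pre : List Char) (d : PySem.Dict Char Int) (h : pvInvB pre d) :
    ∀ v ∈ d.values, 0 ≤ v := by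
  intro v hv
  obtain ⟨hnd, hget⟩ := h
  rw [PySem.Dict.values_eq_map_keys d hnd (-1)] at hv
  obtain ⟨k, hk, rfl⟩ := List.mem_map.mp hv
  have hkpre : k ∈ pre := (pvMemKeys pre d ⟨hnd, hget⟩ k).mp hk
  rw [PySem.Dict.getD_eq_get?_getD, hget k, if_pos hkpre]
  exact (pvLast_mem k pre).mp hkpre

-- the number of distinct characters of pre[l:] = number of recorded last occurrences ≥ l
lemma pvDC_window_eq_filter (pre : List Char) (d : PySem.Dict Char Int) (h : pvInvB pre d) (l : Nat) :
    pvDC (pre.drop l) = (d.values.filter (fun v => decide ((l : Int) ≤ v))).length := by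
  obtain ⟨hnd, hget⟩ := h
  rw [PySem.Dict.values_eq_map_keys d hnd (-1), List.filter_map, List.length_map]
  refine (pvLen_eq_DC _ _ (hnd.filter _) ?_).symm
  intro a
  simp only [List.mem_filter, Function.comp]
  constructor
  · rintro ⟨hak, hp⟩
    have hapre : a ∈ pre := (pvMemKeys pre d ⟨hnd, hget⟩ a).mp hak
    have hval : d.getD a (-1) = pvLast pre a := by
      rw [PySem.Dict.getD_eq_get?_getD, hget a, if_pos hapre]; rfl
    simp only [hval, decide_eq_true_eq] at hp
    exact (pvLast_drop a l pre).mpr hp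
  · intro ha
    have hapre : a ∈ pre := List.mem_of_mem_drop ha
    have hlast := (pvLast_drop a l pre).mp ha
    refine ⟨(pvMemKeys pre d ⟨hnd, hget⟩ a).mpr hapre, ?_⟩
    have hval : d.getD a (-1) = pvLast pre a := by
      rw [PySem.Dict.getD_eq_get?_getD, hget a, if_pos hapre]; rfl
    simp only [hval, decide_eq_true_eq]
    exact hlast

lemma pvInvB_insert (pre : List Char) (c : Char) (d : PySem.Dict Char Int)
    (h : pvInvB pre d) : pvInvB (pre ++ [c]) (d.insert c (pre.length : Int)) := by
  obtain ⟨hnd, hget⟩ := h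
  refine ⟨PySem.Dict.nodup_keys_insert d c _ hnd, fun ch => ?_⟩
  rw [PySem.Dict.get?_insert, pvLast_append]
  by_cases hch : ch = c
  · simp [hch]
  · rw [if_neg hch, if_neg hch, hget ch]
    have hmem : (ch ∈ pre ++ [c]) ↔ ch ∈ pre := by simp [hch]
    by_cases hp : ch ∈ pre
    · rw [if_pos hp, if_pos (hmem.mpr hp)]
    · rw [if_neg hp, if_neg (fun hq => hp (hmem.mp hq))]

-- the LINK: B's per-step addition (third-largest last occurrence + 1, or 0) IS A's left pointer
lemma pvLink (pre : List Char) (leftN : Nat) (m d : PySem.Dict Char Int)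
    (hA : pvInvA pre leftN m) (hB : pvInvB pre d) :
    (if 3 ≤ d.size then
        PySem.List.pyGetD (PySem.List.sorted d.values (fun v => v) true) 2 0 + 1
      else 0) = (leftN : Int) := by
  obtain ⟨hle, hnd, hcnt, hnz, hmin, htop⟩ := hA
  have hDC : ∀ l : Nat, pvDC (pre.drop l) = (d.values.filter (fun v => decide ((l : Int) ≤ v))).length :=
    pvDC_window_eq_filter pre d hB
  have hperm : (PySem.List.sorted d.values (fun v => v) true).Perm d.values :=
    PySem.List.sorted_perm d.values _ true
  set W := PySem.List.sorted d.values (fun v => v) true with hW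
  have hlenWV : W.length = d.values.length := hperm.length_eq
  have hsizeV : d.size = d.values.length := pvSize_eq_values_length d
  have hfilterW : ∀ l : Nat,
      (W.filter (fun v => decide ((l : Int) ≤ v))).length
        = (d.values.filter (fun v => decide ((l : Int) ≤ v))).length :=
    fun l => (hperm.filter _).length_eq
  have hmono : ∀ (i j : Nat) (hi : i < W.length) (hj : j < W.length), i ≤ j → W[j] ≤ W[i] := by
    intro i j hi hj hij
    have hp := PySem.List.sorted_pairwise_rev d.values (fun v => v)
    rcases Nat.eq_or_lt_of_le hij with rfl | hlt
    · exact le_refl _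
    · exact (List.pairwise_iff_getElem.mp hp) i j hi hj hlt
  by_cases h3 : 3 ≤ d.size
  · rw [if_pos h3]
    have h2W : 2 < W.length := by omega
    have hget2 : PySem.List.pyGetD W 2 0 = W[2] := by
      rw [PySem.List.pyGetD_ofNat']
      exact List.getD_eq_getElem W 0 h2W
    rw [hget2]
    have hnn : 0 ≤ W[2] := pvValues_nonneg pre d hB _ (hperm.subset (List.getElem_mem h2W))
    set L : Nat := W[2].toNat + 1 with hL
    have hLint : (L : Int) = W[2] + 1 := by rw [hL]; push_cast; omega
    have hPL : pvDC (pre.drop L) ≤ 2 := by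
      rw [hDC L, ← hfilterW L]
      have hdropnil : (W.drop 2).filter (fun v => decide ((L : Int) ≤ v)) = [] := by
        rw [List.filter_eq_nil_iff]
        intro v hv
        obtain ⟨j, hj, hvj⟩ := List.mem_iff_getElem.mp hv
        have hjlen : 2 + j < W.length := by
          rw [List.length_drop] at hj
          omega
        have hvW : v = W[2 + j] := by rw [← hvj, List.getElem_drop]
        have hle2 : W[2 + j] ≤ W[2] := hmono 2 (2 + j) h2W hjlen (by omega)
        simp only [decide_eq_true_eq]
        omega
      calc (W.filter (fun v => decide ((L : Int) ≤ v))).length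
          = ((W.take 2 ++ W.drop 2).filter (fun v => decide ((L : Int) ≤ v))).length := by
            rw [List.take_append_drop]
        _ = ((W.take 2).filter (fun v => decide ((L : Int) ≤ v))).length
            + ((W.drop 2).filter (fun v => decide ((L : Int) ≤ v))).length := by
            rw [List.filter_append, List.length_append]
        _ ≤ 2 := by
            rw [hdropnil]
            have h1 : ((W.take 2).filter (fun v => decide ((L : Int) ≤ v))).length ≤ (W.take 2).length :=
              List.length_filter_le _ _
            have h2 : (W.take 2).length ≤ 2 := by
              rw [List.length_take]; omega
            simp
            omega
    have hPj : ∀ j : Nat, j < L → 3 ≤ pvDC (pre.drop j) := by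
      intro j hj
      rw [hDC j, ← hfilterW j]
      have hjle : (j : Int) ≤ W[2] := by
        have : (j : Int) < (L : Int) := by exact_mod_cast hj
        omega
      have htake : (W.take 3).filter (fun v => decide ((j : Int) ≤ v)) = W.take 3 := by
        rw [List.filter_eq_self]
        intro v hv
        obtain ⟨k, hk, hvk⟩ := List.mem_iff_getElem.mp hv
        have hklen : k < W.length := by
          rw [List.length_take] at hk
          omega
        have hk3 : k ≤ 2 := by
          rw [List.length_take] at hk
          omega
        have hvW : v = W[k] := by rw [← hvk, List.getElem_take]
        have : W[2] ≤ W[k] := hmono k 2 hklen h2W hk3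
        simp only [decide_eq_true_eq]
        omega
      calc (3 : Nat) = (W.take 3).length := by rw [List.length_take]; omega
        _ = ((W.take 3).filter (fun v => decide ((j : Int) ≤ v))).length := by rw [htake]
        _ ≤ (W.filter (fun v => decide ((j : Int) ≤ v))).length := by
            conv_rhs => rw [← List.take_append_drop 3 W]
            rw [List.filter_append, List.length_append]
            omega
    have heq : leftN = L := by
      by_contra hne
      rcases Nat.lt_or_ge leftN L with hlt | hge
      · have := hPj leftN hlt; omega
      · have hlt2 : L < leftN := by omega
        have := hmin L hlt2; omega
    rw [heq]
    omega
  · rw [if_neg h3]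
    have h0 : pvDC (pre.drop 0) ≤ 2 := by
      rw [hDC 0]
      simp only [Nat.cast_zero]
      have h1 : (d.values.filter (fun v => decide ((0 : Int) ≤ v))).length ≤ d.values.length :=
        List.length_filter_le _ _
      omega
    have : leftN = 0 := by
      by_contra h
      have := hmin 0 (Nat.pos_of_ne_zero h)
      omega
    simp [this]

-- lockstep run of the two for-loops: A's state (cnt, left, m) and B's state (ans, d) stay tied by
-- cnt = ans + (n - |pre|)·left (partial Abel summation of A's (n-i)·Δleft against B's Σ left)
lemma pvMain (cs : List Char) :
    ∀ (rest pre : List Char) (leftN : Nat) (m d : PySem.Dict Char Int) (cnt ans : Int),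
    cs = pre ++ rest → pvInvA pre leftN m → pvInvB pre d →
    cnt = ans + ((cs.length : Int) - (pre.length : Int)) * (leftN : Int) →
    ((PySem.List.pyRange (pre.length : Int) (cs.length : Int) 1).foldl (pvStepA cs (cs.length : Int)) (cnt, (leftN : Int), m)).1
      = ((PySem.List.enumerate rest (pre.length : Int)).foldl pvStepB (ans, d)).1 := by
  intro rest
  induction rest with
  | nil =>
    intro pre leftN m d cnt ans hcs hA hB hrel
    have hp : pre = cs := by simpa using hcs.symm
    subst hp
    rw [PySem.List.pyRange_one_eq_nil (le_refl _)]
    simp [PySem.List.enumerate]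
    omega
  | cons c rest' ih =>
    intro pre leftN m d cnt ans hcs hA hB hrel
    obtain ⟨hle, hnd, hcnt, hnz, hmin, htop⟩ := hA
    have hlen : cs.length = pre.length + 1 + rest'.length := by rw [hcs]; simp; omega
    have hltn : ((pre.length : Nat) : Int) < ((cs.length : Nat) : Int) := by
      have : pre.length < cs.length := by omega
      exact_mod_cast this
    rw [PySem.List.pyRange_one_cons hltn, PySem.List.enumerate_cons]
    simp only [List.foldl_cons]
    have hgetr : PySem.List.pyGetD cs ((pre.length : Nat) : Int) ' ' = c := by
      rw [PySem.List.pyGetD_natCast, hcs, List.getD_eq_getElem?_getD,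
        List.getElem?_append_right (le_refl _)]
      simp
    set pre1 : List Char := pre ++ [c] with hpre1def
    have hlen1 : pre1.length = pre.length + 1 := by rw [hpre1def]; simp
    have hwin1 : pre1.drop leftN = pre.drop leftN ++ [c] := by
      rw [hpre1def, List.drop_append_of_le_length hle]
    -- A's frequency update
    set m1 : PySem.Dict Char Int := m.modify c 0 (· + 1) with hm1def
    have hcnt1 : ∀ ch, m1.getD ch 0 = ((pre1.drop leftN).count ch : Int) := by
      intro ch
      rw [hm1def, PySem.Dict.getD_modify, hwin1, List.count_append]
      by_cases hch : ch = c
      · rw [if_pos hch, hch, hcnt]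
        simp
      · rw [if_neg hch, hcnt]
        have : (c == ch) = false := by simp; exact fun e => hch e.symm
        simp [List.count_cons, this]
    have hnd1 : m1.keys.Nodup := by
      rw [hm1def, PySem.Dict.keys_modify]
      exact PySem.Dict.nodup_keys_insert m c _ hnd
    have hnz1 : ∀ ch ∈ m1.keys, m1.getD ch 0 ≠ 0 := by
      intro ch hch
      by_cases hch' : ch = c
      · have hcw : 1 ≤ (pre1.drop leftN).count c := by
          rw [hwin1, List.count_append]
          simp
        rw [hcnt1, hch']
        omega
      · rw [hm1def, PySem.Dict.getD_modify, if_neg hch']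
        rw [hm1def, PySem.Dict.keys_modify] at hch
        by_cases hcont : m.contains c = true
        · rw [PySem.Dict.keys_insert_of_contains m _ hcont] at hch
          exact hnz ch hch
        · rw [PySem.Dict.keys_insert_of_not_contains m _ (by simpa using hcont)] at hch
          rcases List.mem_append.mp hch with h | h
          · exact hnz ch h
          · simp at h; exact absurd h hch'
    have hszm : m.size ≤ 2 := by
      rw [pvSize_eq_keys_length, pvKeys_length_eq_DC _ m hnd hcnt hnz]
      exact htop
    have hsz1 : m1.size ≤ 3 := by
      rw [show m1 = m.insert c (m.getD c 0 + 1) from rfl, PySem.Dict.size_insert]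
      split_ifs <;> omega
    have hmin1 : ∀ j : Nat, j < leftN → 3 ≤ pvDC (pre1.drop j) := by
      intro j hj
      have hjle : j ≤ pre.length := by omega
      have hdp : pre1.drop j = pre.drop j ++ [c] := by
        rw [hpre1def, List.drop_append_of_le_length hjle]
      rw [hdp]
      exact le_trans (hmin j hj) (pvDC_append_ge _ _)
    -- run A's while-loop
    obtain ⟨l', m', hSA, hll', hinv'⟩ :=
      pvShrink_spec cs ((cs.length : Nat) : Int) ((pre.length : Nat) : Int) cs.length pre1 leftN m1 cnt
        ⟨rest', by rw [hpre1def, hcs]; simp⟩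
        (by omega) hnd1 hcnt1 hnz1 hmin1 (by omega) hsz1
    -- B's table update
    have hB1 : pvInvB pre1 (d.insert c ((pre.length : Nat) : Int)) := pvInvB_insert pre c d hB
    set d1 : PySem.Dict Char Int := d.insert c ((pre.length : Nat) : Int) with hd1def
    have hlink := pvLink pre1 l' m' d1 hinv' hB1
    have hstepB : pvStepB (ans, d) (((pre.length : Nat) : Int), c) = (ans + (l' : Int), d1) := by
      simp only [pvStepB, ← hd1def]
      by_cases hsd : 3 ≤ d1.size
      · rw [if_pos hsd] at hlink ⊢
        rw [hlink]
      · rw [if_neg hsd] at hlink ⊢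
        rw [← hlink]
        simp
    have hcs1 : cs = pre1 ++ rest' := by rw [hpre1def, hcs]; simp
    have hcast : ((pre1.length : Nat) : Int) = ((pre.length : Nat) : Int) + 1 := by
      rw [hlen1]; push_cast; ring
    have hrel1 : cnt + ((cs.length : Int) - (pre.length : Int)) * ((l' : Int) - (leftN : Int))
        = (ans + (l' : Int)) + ((cs.length : Int) - (pre1.length : Int)) * (l' : Int) := by
      rw [hcast]
      linear_combination hrel
    have := ih pre1 l' m' d1
      (cnt + ((cs.length : Int) - (pre.length : Int)) * ((l' : Int) - (leftN : Int)))
      (ans + (l' : Int)) hcs1 hinv' hB1 hrel1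
    rw [pvStepA, hgetr, ← hm1def, hSA, hstepB]
    rw [hcast] at this
    exact this

-- ===== VERDICT (by name: the statement is the Claim_ definition above) =====
theorem optsubstring_spec : Claim_equal_optsubstring := by
  intro s _hdom
  unfold Spec_optsubstring optsubstring optsubstring_alt
  simp only [PySem.Str.len_eq]
  have hA0 : pvInvA [] 0 PySem.Dict.empty := by
    refine ⟨le_refl _, PySem.Dict.nodup_keys_empty, ?_, ?_, ?_, ?_⟩
    · intro ch; simp [PySem.Dict.getD_empty]
    · intro ch hch; simp [PySem.Dict.keys, PySem.Dict.empty] at hch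
    · intro j hj; omega
    · simp [pvDC]
  have hB0 : pvInvB [] PySem.Dict.empty := by
    refine ⟨PySem.Dict.nodup_keys_empty, fun ch => ?_⟩
    simp [PySem.Dict.get?_empty]
  have h := pvMain s.toList s.toList [] 0 PySem.Dict.empty PySem.Dict.empty 0 0
    rfl hA0 hB0 (by simp)
  simpa using h
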